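-- pv_equiv track=rewrite | github.com/SethMess/Seng265 | a2/concord2.py | sort_input
-- ===== SOURCE A (Python) =====
-- def sort_input(ex_words, index_lines):
-- 	words_list = []
-- 	for line in index_lines:
-- 		words_list.extend(line.split()) #all words to loop ahrough
--
-- 	#this section makes all exclusion words lower case
-- 	ex_words = ' '.join(ex_words)
-- 	ex_words = ex_words.lower()
-- 	ex_words = ex_words.split()
--
-- 	loop_words = []
-- 	for word in words_list:
-- 		if(word.lower() not in ex_words):
-- 			loop_words.append(word.lower())
--
-- 	loop_words = set(loop_words)	#this part removes duplicates
-- 	loop_words = list(loop_words)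
-- 	loop_words.sort() #final list to loop through sorted
-- 	return loop_words
-- ===== SOURCE B (Python) =====
-- def sort_input(ex_words, index_lines):
-- 	excl = set(' '.join(ex_words).lower().split())
-- 	all_words = sorted(w.lower() for line in index_lines for w in line.split())
-- 	out = []
-- 	for w in all_words:
-- 		if w in excl:
-- 			continue
-- 		if out and out[-1] == w:
-- 			continue
-- 		out.append(w)
-- 	return out
-- ===== Notes on version B (the rewrite author's own statement) =====
-- stated objective: faster
-- what changed: Instead of A's per-word linear scan of the exclusion list followed by set() dedup and a sort, B sorts the lowercased words first and removes duplicates and exclusions in one linear scan comparing each word with the last emitted one (adjacent-dedup on a sorted list, set-membership exclusion).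
import Mathlib
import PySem

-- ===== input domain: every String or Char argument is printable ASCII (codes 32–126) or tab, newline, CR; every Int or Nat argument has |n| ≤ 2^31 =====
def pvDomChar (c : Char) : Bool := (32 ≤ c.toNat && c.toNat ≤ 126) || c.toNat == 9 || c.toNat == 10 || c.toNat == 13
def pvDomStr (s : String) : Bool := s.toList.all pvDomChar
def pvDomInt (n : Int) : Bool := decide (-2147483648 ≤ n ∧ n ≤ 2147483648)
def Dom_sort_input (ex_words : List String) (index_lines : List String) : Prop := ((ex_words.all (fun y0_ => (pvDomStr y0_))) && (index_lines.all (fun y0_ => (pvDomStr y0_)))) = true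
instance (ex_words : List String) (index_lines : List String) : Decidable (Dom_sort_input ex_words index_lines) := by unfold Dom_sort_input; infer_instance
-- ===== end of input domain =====

-- ===== PORT A =====
-- One honest line: B sorts the lowercased words first and removes duplicates by a single
-- adjacent-comparison scan that also skips excluded words, instead of A's filter loop + set() + sort.
def sort_input (ex_words : List String) (index_lines : List String) : List String :=
  let words_list := index_lines.foldl (fun acc line => acc ++ PySem.Str.split₀ line) []
  let ex1 := PySem.Str.join " " ex_words
  let ex2 := PySem.Str.lower ex1
  let ex3 := PySem.Str.split₀ ex2
  let loop_words := words_list.foldl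
    (fun acc word => if PySem.Str.lower word ∈ ex3 then acc else acc ++ [PySem.Str.lower word]) []
  -- set(loop_words); list(...); .sort(): order-insensitive since sorted without key
  PySem.List.sorted (PySem.Set.ofList loop_words) (fun x => x) false

-- ===== PORT B =====
def sort_input_alt (ex_words : List String) (index_lines : List String) : List String :=
  let excl : PySem.Set String :=
    PySem.Set.ofList (PySem.Str.split₀ (PySem.Str.lower (PySem.Str.join " " ex_words)))
  let all_words :=
    PySem.List.sorted ((index_lines.flatMap (fun line => PySem.Str.split₀ line)).map PySem.Str.lower)
      (fun x => x) false
  -- 'out and out[-1] == w' is exactly 'out.getLast? = some w'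
  all_words.foldl
    (fun out w =>
      if w ∈ excl then out
      else if out.getLast? = some w then out
      else out ++ [w]) []

-- ===== PRECONDITION & SPEC =====
def Spec_sort_input (ex_words : List String) (index_lines : List String) (out : List String) : Prop := out = sort_input_alt ex_words index_lines
instance (ex_words : List String) (index_lines : List String) (out : List String) : Decidable (Spec_sort_input ex_words index_lines out) := by unfold Spec_sort_input; infer_instance

-- ===== CLAIM (what is proved, stated in full; the proofs are below) =====
def Claim_equal_sort_input : Prop := ∀ (ex_words : List String) (index_lines : List String), Dom_sort_input ex_words index_lines → Spec_sort_input ex_words index_lines (sort_input ex_words index_lines)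

-- ===== LEMMAS AND PROOFS =====

-- A's filter loop is the map-over-filter of the kept words
theorem loop_words_eq (ex3 ws : List String) :
    ws.foldl (fun acc w => if PySem.Str.lower w ∈ ex3 then acc else acc ++ [PySem.Str.lower w]) [] =
    (ws.filter (fun w => !decide (PySem.Str.lower w ∈ ex3))).map PySem.Str.lower := by
  have h := PySem.List.foldl_append_if (fun w => !decide (PySem.Str.lower w ∈ ex3)) PySem.Str.lower ws []
  simp only [List.nil_append] at h
  rw [← h]
  congr 1
  funext acc w
  by_cases hw : PySem.Str.lower w ∈ ex3 <;> simp [hw]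

-- every element of a strictly increasing list is ≤ its last element
theorem le_getLast_of_pairwise_lt : ∀ (acc : List String), acc.Pairwise (· < ·) →
    ∀ a ∈ acc, ∃ l, acc.getLast? = some l ∧ a ≤ l := by
  intro acc
  induction acc with
  | nil => intro _ a ha; cases ha
  | cons x t ih =>
    intro h a ha
    have hp := (List.pairwise_cons.1 h)
    cases t with
    | nil =>
      simp at ha; subst ha; exact ⟨a, rfl, le_refl a⟩
    | cons y t' =>
      rcases List.mem_cons.1 ha with rfl | ha'
      · obtain ⟨l, hl, hle⟩ := ih hp.2 y List.mem_cons_self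
        exact ⟨l, by simpa [List.getLast?_cons_cons] using hl,
          le_trans (le_of_lt (hp.1 y List.mem_cons_self)) hle⟩
      · obtain ⟨l, hl, hle⟩ := ih hp.2 a ha'
        exact ⟨l, by simpa [List.getLast?_cons_cons] using hl, hle⟩

-- invariant of B's scan: over a ≤-sorted list, with a strictly increasing accumulator whose
-- elements are ≤ everything still to come, the fold stays strictly increasing and its members
-- are the accumulator's plus the non-excluded words
theorem scan_spec (excl : List String) : ∀ (ws acc : List String),
    ws.Pairwise (· ≤ ·) → acc.Pairwise (· < ·) → (∀ a ∈ acc, ∀ w ∈ ws, a ≤ w) →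
    (ws.foldl (fun out w => if w ∈ excl then out
        else if out.getLast? = some w then out else out ++ [w]) acc).Pairwise (· < ·) ∧
    ∀ x, x ∈ ws.foldl (fun out w => if w ∈ excl then out
        else if out.getLast? = some w then out else out ++ [w]) acc ↔
      x ∈ acc ∨ (x ∈ ws ∧ x ∉ excl) := by
  intro ws
  induction ws with
  | nil => intro acc _ hacc _; exact ⟨hacc, by simp⟩
  | cons w rest ih =>
    intro acc hws hacc hbound
    have hws' := (List.pairwise_cons.1 hws)
    by_cases hx : w ∈ excl
    · simp only [List.foldl_cons, if_pos hx]
      obtain ⟨h1, h2⟩ := ih acc hws'.2 hacc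
        (fun a ha r hr => hbound a ha r (List.mem_cons_of_mem _ hr))
      refine ⟨h1, fun x => ?_⟩
      rw [h2 x]
      constructor
      · rintro (h | ⟨h, hn⟩); · exact Or.inl h
        · exact Or.inr ⟨List.mem_cons_of_mem _ h, hn⟩
      · rintro (h | ⟨h, hn⟩); · exact Or.inl h
        · rcases List.mem_cons.1 h with rfl | h'
          · exact absurd hx hn
          · exact Or.inr ⟨h', hn⟩
    · simp only [List.foldl_cons, if_neg hx]
      by_cases hl : acc.getLast? = some w
      · simp only [if_pos hl]
        have hwmem : w ∈ acc := by
          have := List.getLast?_eq_some_iff.1 hl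
          obtain ⟨t, rfl⟩ := this
          simp
        obtain ⟨h1, h2⟩ := ih acc hws'.2 hacc
          (fun a ha r hr => hbound a ha r (List.mem_cons_of_mem _ hr))
        refine ⟨h1, fun x => ?_⟩
        rw [h2 x]
        constructor
        · rintro (h | ⟨h, hn⟩); · exact Or.inl h
          · exact Or.inr ⟨List.mem_cons_of_mem _ h, hn⟩
        · rintro (h | ⟨h, hn⟩); · exact Or.inl h
          · rcases List.mem_cons.1 h with rfl | h'
            · exact Or.inl hwmem
            · exact Or.inr ⟨h', hn⟩
      · simp only [if_neg hl]
        -- acc ++ [w] is strictly increasing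
        have hlt : ∀ a ∈ acc, a < w := by
          intro a ha
          obtain ⟨l, hlast, hle⟩ := le_getLast_of_pairwise_lt acc hacc a ha
          have halw : a ≤ w := hbound a ha w List.mem_cons_self
          rcases lt_or_eq_of_le halw with h | rfl
          · exact h
          · have : l ≤ a := by
              have hlmem : l ∈ acc := by
                have := List.getLast?_eq_some_iff.1 hlast
                obtain ⟨t, ht⟩ := this
                rw [ht]; simp
              have := hbound l hlmem a List.mem_cons_self
              exact this
            have : l = a := le_antisymm this hle
            exact absurd (this ▸ hlast) hl
        have hacc' : (acc ++ [w]).Pairwise (· < ·) := by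
          rw [List.pairwise_append]
          exact ⟨hacc, List.pairwise_singleton _ _, fun a ha b hb => by
            simp at hb; subst hb; exact hlt a ha⟩
        have hbound' : ∀ a ∈ acc ++ [w], ∀ r ∈ rest, a ≤ r := by
          intro a ha r hr
          rcases List.mem_append.1 ha with h | h
          · exact hbound a h r (List.mem_cons_of_mem _ hr)
          · simp at h; subst h; exact hws'.1 r hr
        obtain ⟨h1, h2⟩ := ih (acc ++ [w]) hws'.2 hacc' hbound'
        refine ⟨h1, fun x => ?_⟩
        rw [h2 x]
        constructor
        · rintro (h | ⟨h, hn⟩)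
          · rcases List.mem_append.1 h with h' | h'
            · exact Or.inl h'
            · simp at h'; subst h'; exact Or.inr ⟨List.mem_cons_self, hx⟩
          · exact Or.inr ⟨List.mem_cons_of_mem _ h, hn⟩
        · rintro (h | ⟨h, hn⟩)
          · exact Or.inl (List.mem_append.2 (Or.inl h))
          · rcases List.mem_cons.1 h with rfl | h'
            · exact Or.inl (List.mem_append.2 (Or.inr (by simp)))
            · exact Or.inr ⟨h', hn⟩

-- ===== VERDICT (by name: the statement is the Claim_ definition above) =====
theorem sort_input_spec : Claim_equal_sort_input := by
  intro ex_words index_lines _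
  unfold Spec_sort_input sort_input sort_input_alt
  simp only []
  rw [PySem.List.foldl_append_eq_flatMap, List.nil_append, loop_words_eq]
  have hsortedp : (PySem.List.sorted
      ((index_lines.flatMap fun line => PySem.Str.split₀ line).map PySem.Str.lower)
      (fun x => x) false).Pairwise (· ≤ ·) := by
    have := PySem.List.sorted_pairwise
      (xs := (index_lines.flatMap fun line => PySem.Str.split₀ line).map PySem.Str.lower)
      (key := fun x => x)
    simpa using this
  obtain ⟨h1, h2⟩ := scan_spec
    (PySem.Set.ofList (PySem.Str.split₀ (PySem.Str.lower (PySem.Str.join " " ex_words))))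
    (PySem.List.sorted
      ((index_lines.flatMap fun line => PySem.Str.split₀ line).map PySem.Str.lower)
      (fun x => x) false) [] hsortedp (List.Pairwise.nil) (by simp)
  apply PySem.List.sorted_eq_of_perm_of_pairwise_lt
  · -- the scanned list is a permutation of set(loop_words)
    apply (List.perm_ext_iff_of_nodup (h1.imp ne_of_lt) (PySem.Set.nodup_ofList _)).2
    intro x
    rw [h2 x]
    simp only [List.not_mem_nil, false_or, PySem.Set.mem_ofList, PySem.List.mem_sorted,
      List.mem_map, List.mem_filter, Bool.not_eq_eq_eq_not, Bool.not_true,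
      decide_eq_false_iff_not]
    constructor
    · rintro ⟨⟨w, hw, rfl⟩, hn⟩
      exact ⟨w, ⟨hw, hn⟩, rfl⟩
    · rintro ⟨w, ⟨hw, hn⟩, rfl⟩
      exact ⟨⟨w, hw, rfl⟩, hn⟩
  · simpa using h1
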